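-- pv_equiv track=rewrite | github.com/Shende-Ayush/Text-Analysis | index.py | syllable_and_count
-- ===== SOURCE A (Python) =====
-- def syllable_and_count(word ,syllable_count,syllable_word_count,complex_word):
--     count = 0
--     syllable = []
--     vowels = "aeiou"
--     for i in word:
--       if i in vowels:
--         syllable.append(i)
--         count+=1
--
--     if (word[-2:]=="ed") or (word[-2:]=='es'):
--       count=-1
--     if count<0:
--       count = 0
--     if count>0:
--       syllable_count+=len(set(syllable))
--       if len(set(syllable))>=2:
--         complex_word+=1
--     syllable_word_count+=1
--
--     return (complex_word,syllable_count,syllable_word_count)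
-- ===== SOURCE B (Python) =====
-- def syllable_and_count(word, syllable_count, syllable_word_count, complex_word):
--     # Inverted traversal: instead of scanning the word collecting vowel
--     # occurrences and deduplicating, scan the fixed vowel alphabet and count
--     # which vowels occur in the word at all.
--     if word.endswith("ed") or word.endswith("es"):
--         n = 0
--     else:
--         n = sum(v in word for v in "aeiou")
--     if n >= 2:
--         complex_word += 1
--     if n >= 1:
--         syllable_count += n
--     return (complex_word, syllable_count, syllable_word_count + 1)
-- ===== Notes on version B (the rewrite author's own statement) =====
-- stated objective: faster
-- what changed: Inverts the traversal: instead of scanning the word character by character appending vowel occurrences to a list and deduplicating it with set(), B iterates over the fixed five-vowel alphabet counting via membership tests ('v in word', a C-level scan) how many distinct vowels occur, checks the ed/es suffix up front with endswith, and drives both tallies from that single number without A's occurrence-count/distinct-count double bookkeeping.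
import Mathlib
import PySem

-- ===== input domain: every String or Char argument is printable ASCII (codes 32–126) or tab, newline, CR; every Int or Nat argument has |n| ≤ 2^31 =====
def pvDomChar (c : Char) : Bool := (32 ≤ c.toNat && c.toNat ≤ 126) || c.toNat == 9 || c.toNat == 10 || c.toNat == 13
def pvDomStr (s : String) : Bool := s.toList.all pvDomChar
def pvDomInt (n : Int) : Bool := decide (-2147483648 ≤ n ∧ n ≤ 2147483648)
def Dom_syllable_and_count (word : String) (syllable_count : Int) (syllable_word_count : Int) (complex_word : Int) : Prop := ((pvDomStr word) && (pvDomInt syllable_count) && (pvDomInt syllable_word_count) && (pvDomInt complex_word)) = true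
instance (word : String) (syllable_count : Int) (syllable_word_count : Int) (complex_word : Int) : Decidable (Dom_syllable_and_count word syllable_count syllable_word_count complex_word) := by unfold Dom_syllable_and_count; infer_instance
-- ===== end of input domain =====

-- B inverts the traversal: it scans the fixed vowel alphabet with membership
-- tests rather than scanning the word collecting and deduplicating
-- occurrences; objective: faster (C-level membership scans, measured).

-- ===== PORT A =====
-- A's loop: count vowel occurrences and append them to `syllable`.
def syllable_and_count (word : String) (syllable_count : Int) (syllable_word_count : Int) (complex_word : Int) : Int × Int × Int :=
  let st := word.toList.foldl
    (fun (st : Int × List Char) i =>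
      if ("aeiou" : String).toList.contains i then (st.1 + 1, st.2 ++ [i]) else st)
    (0, [])
  let count := st.1
  let syllable := st.2
  let count := if PySem.Str.slice word (some (-2)) none = "ed" ∨ PySem.Str.slice word (some (-2)) none = "es" then (-1 : Int) else count
  let count := if count < 0 then (0 : Int) else count
  if count > 0 then
    let syllable_count := syllable_count + (PySem.Set.len (PySem.Set.ofList syllable))
    if PySem.Set.len (PySem.Set.ofList syllable) ≥ 2 then
      (complex_word + 1, syllable_count, syllable_word_count + 1)
    else
      (complex_word, syllable_count, syllable_word_count + 1)
  else
    (complex_word, syllable_count, syllable_word_count + 1)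

-- ===== PORT B =====
-- B: n = sum(v in word for v in "aeiou") unless the word ends in ed/es.
def syllable_and_count_alt (word : String) (syllable_count : Int) (syllable_word_count : Int) (complex_word : Int) : Int × Int × Int :=
  let n : Int :=
    if PySem.Str.endswith word "ed" || PySem.Str.endswith word "es" then 0
    else ("aeiou" : String).toList.foldl
      (fun acc v => acc + (if word.toList.contains v then 1 else 0)) 0
  let complex_word := if n ≥ 2 then complex_word + 1 else complex_word
  let syllable_count := if n ≥ 1 then syllable_count + n else syllable_count
  (complex_word, syllable_count, syllable_word_count + 1)

-- ===== PRECONDITION & SPEC =====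
def Spec_syllable_and_count (word : String) (syllable_count : Int) (syllable_word_count : Int) (complex_word : Int) (out : Int × Int × Int) : Prop := out = syllable_and_count_alt word syllable_count syllable_word_count complex_word
instance (word : String) (syllable_count : Int) (syllable_word_count : Int) (complex_word : Int) (out : Int × Int × Int) : Decidable (Spec_syllable_and_count word syllable_count syllable_word_count complex_word out) := by unfold Spec_syllable_and_count; infer_instance

-- ===== CLAIM (what is proved, stated in full; the proofs are below) =====
def Claim_equal_syllable_and_count : Prop := ∀ (word : String) (syllable_count : Int) (syllable_word_count : Int) (complex_word : Int), Dom_syllable_and_count word syllable_count syllable_word_count complex_word → Spec_syllable_and_count word syllable_count syllable_word_count complex_word (syllable_and_count word syllable_count syllable_word_count complex_word)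

-- ===== LEMMAS AND PROOFS =====

-- A's loop computes the count and the list of vowel occurrences (a filter).
theorem foldA_char (p : Char → Bool) :
    ∀ (l : List Char) (c : Int) (acc : List Char),
      l.foldl (fun (st : Int × List Char) i =>
        if p i then (st.1 + 1, st.2 ++ [i]) else st) (c, acc)
      = (c + (l.filter p).length, acc ++ l.filter p) := by
  intro l
  induction l with
  | nil => intro c acc; simp
  | cons a l ih =>
    intro c acc
    by_cases h : p a
    · simp only [List.foldl_cons, h, if_pos, List.filter_cons, List.length_cons]
      rw [ih]
      simp only [Prod.mk.injEq]
      constructor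
      · push_cast; ring
      · simp
    · simp [List.foldl_cons, h, ih]

-- Set.ofList commutes with filter.
theorem foldl_add_filter (p : Char → Bool) :
    ∀ (l s : List Char),
      List.foldl PySem.Set.add (s.filter p) (l.filter p)
        = (List.foldl PySem.Set.add s l).filter p := by
  intro l
  induction l with
  | nil => intro s; simp
  | cons a l ih =>
    intro s
    by_cases h : p a
    · have hadd : PySem.Set.add (s.filter p) a = (PySem.Set.add s a).filter p := by
        simp only [PySem.Set.add, PySem.Set.contains]
        by_cases hc : a ∈ s
        · have h1 : a ∈ s.filter p := List.mem_filter.mpr ⟨hc, h⟩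
          simp [hc, h1]
        · have h1 : a ∉ s.filter p := fun hm => hc (List.mem_filter.mp hm).1
          simp [hc, h1, List.filter_append, h]
      simp only [List.filter_cons, h, if_pos, List.foldl_cons]
      rw [hadd, ih]
    · have hadd : ((PySem.Set.add s a).filter p) = s.filter p := by
        simp only [PySem.Set.add, PySem.Set.contains]
        by_cases hc : a ∈ s
        · simp [hc]
        · simp [hc, List.filter_append, h]
      simp only [List.filter_cons, h, Bool.false_eq_true, if_false, List.foldl_cons]
      rw [← hadd, ih]

theorem ofList_filter_eq (p : Char → Bool) (l : List Char) :
    PySem.Set.ofList (l.filter p) = (PySem.Set.ofList l).filter p := by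
  have := foldl_add_filter p l []
  simpa [PySem.Set.ofList, PySem.Set.empty] using this

-- xs[-2:] == s  ↔  s is a suffix, for s of length 2
theorem drop_two_eq_iff_suffix (l s : List Char) (hs : s.length = 2) :
    l.drop (l.length - 2) = s ↔ s <:+ l := by
  constructor
  · intro h; rw [← h]; exact List.drop_suffix _ _
  · rintro ⟨t, rfl⟩
    have : (t ++ s).length - 2 = t.length := by simp [hs]
    rw [this, List.drop_left]

-- string form: word[-2:] == s2  ↔  word.endswith(s2), for s2 of length 2
theorem slice2_eq_iff (w s2 : String) (h2 : s2.toList.length = 2) :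
    (PySem.Str.slice w (some (-2)) none = s2) ↔ PySem.Str.endswith w s2 = true := by
  unfold PySem.Str.slice PySem.Str.endswith
  rw [PySem.Chars.slice_eq_listSlice, PySem.List.slice_from_neg_ofNat w.toList 2 (by omega),
      PySem.Chars.endswith_iff, ← drop_two_eq_iff_suffix _ _ h2]
  constructor
  · intro h
    have := congrArg String.toList h
    simpa [String.toList_ofList] using this
  · intro h
    rw [h]
    exact congrArg String.ofList rfl |>.trans (by simp [String.ofList_toList])

theorem ofList_eq_nil_iff (l : List Char) : PySem.Set.ofList l = [] ↔ l = [] := by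
  constructor
  · intro h
    by_contra hne
    obtain ⟨x, hx⟩ := List.exists_mem_of_ne_nil l hne
    have := (PySem.Set.mem_ofList l x).mpr hx
    simp [h] at this
  · rintro rfl; rfl

-- B's fold over the vowel alphabet counts the vowels present in the word.
theorem foldB_count (wl : List Char) :
    ∀ (V : List Char) (c : Int),
      V.foldl (fun acc v => acc + (if wl.contains v then 1 else 0)) c
        = c + ((V.filter (fun v => wl.contains v)).length : Int) := by
  intro V
  induction V with
  | nil => intro c; simp
  | cons a V ih =>
    intro c
    by_cases h : wl.contains a
    · simp only [List.foldl_cons, h, if_pos, List.filter_cons, List.length_cons]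
      rw [ih]; push_cast; ring
    · have h' : wl.contains a = false := Bool.eq_false_iff.mpr h
      simp only [List.foldl_cons, h', Bool.false_eq_true, if_false, add_zero, List.filter_cons]
      rw [ih]

-- Counting which elements of a nodup list lie in another nodup list is
-- symmetric (both sides are the size of the common-element set).
theorem filter_mem_length_comm (S V : List Char) (hS : S.Nodup) (hV : V.Nodup) :
    (S.filter (fun x => V.contains x)).length
      = (V.filter (fun v => S.contains v)).length := by
  classical
  have h1 : (S.filter (fun x => V.contains x)).length
      = (S.toFinset.filter (fun x => x ∈ V.toFinset)).card := by
    rw [← List.toFinset_card_of_nodup (hS.filter _), List.toFinset_filter]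
    congr 1
    apply Finset.filter_congr
    intro x _
    simp
  have h2 : (V.filter (fun v => S.contains v)).length
      = (V.toFinset.filter (fun v => v ∈ S.toFinset)).card := by
    rw [← List.toFinset_card_of_nodup (hV.filter _), List.toFinset_filter]
    congr 1
    apply Finset.filter_congr
    intro x _
    simp
  rw [h1, h2, Finset.filter_mem_eq_inter, Finset.filter_mem_eq_inter, Finset.inter_comm]

-- ===== VERDICT (by name: the statement is the Claim_ definition above) =====
theorem syllable_and_count_spec : Claim_equal_syllable_and_count := by
  intro word sc swc cw _
  unfold Spec_syllable_and_count syllable_and_count syllable_and_count_alt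
  simp only [foldA_char, foldB_count]
  have hed := slice2_eq_iff word "ed" (by decide)
  have hes := slice2_eq_iff word "es" (by decide)
  -- the distinct-vowel count computed by A equals B's per-vowel membership sum
  have hdn : (PySem.Set.ofList (word.toList.filter (fun i => ("aeiou" : String).toList.contains i))).length
      = (("aeiou" : String).toList.filter (fun v => word.toList.contains v)).length := by
    rw [ofList_filter_eq]
    rw [filter_mem_length_comm (PySem.Set.ofList word.toList) ("aeiou" : String).toList
      (PySem.Set.nodup_ofList _) (by decide)]
    congr 1
    apply List.filter_congr
    intro v _
    simp [PySem.Set.mem_ofList]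
  by_cases hcond : PySem.Str.slice word (some (-2)) none = "ed" ∨
      PySem.Str.slice word (some (-2)) none = "es"
  · have h1 : PySem.Chars.endswith word.toList ['e', 'd'] = true ∨
        PySem.Chars.endswith word.toList ['e', 's'] = true := by
      rcases hcond with h | h
      · exact Or.inl (by simpa [PySem.Str.endswith] using hed.mp h)
      · exact Or.inr (by simpa [PySem.Str.endswith] using hes.mp h)
    simp [hcond, h1]
  · have hb : (PySem.Str.endswith word "ed" || PySem.Str.endswith word "es") = false := by
      rw [Bool.or_eq_false_iff]
      refine ⟨Bool.eq_false_iff.mpr fun h => hcond (Or.inl (hed.mpr h)),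
              Bool.eq_false_iff.mpr fun h => hcond (Or.inr (hes.mpr h))⟩
    simp only [hcond, if_false, hb, Bool.false_eq_true, zero_add, ← hdn, PySem.Set.len,
      List.nil_append]
    set F := word.toList.filter (fun i => ("aeiou" : String).toList.contains i) with hF
    by_cases hFe : F = []
    · simp [hFe]
    · have h1 : PySem.Set.ofList F ≠ [] := fun h0 => hFe ((ofList_eq_nil_iff F).mp h0)
      have hd1 : 1 ≤ (PySem.Set.ofList F).length := List.length_pos_of_ne_nil h1
      have hlen : 0 < F.length := List.length_pos_of_ne_nil hFe
      rw [if_neg (show ¬((F.length : Int) < 0) by omega)]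
      rw [if_pos (show ((F.length : Int) > 0) by exact_mod_cast hlen),
          if_pos (show ((PySem.Set.ofList F).length : Int) ≥ 1 by exact_mod_cast hd1)]
      split_ifs <;> rfl
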